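-- pv_equiv track=rewrite | github.com/MegaGiciorPortas/ASD | Sprawdziany/powtorka/asd9/zad2.py | good_start
-- ===== SOURCE A (Python) =====
-- def good_start(G: list[list[int]]):
--     n = len(G)
--     visited = [False] * n
--     topological_sort = []
--
--     def dfs(u, true_key=True):
--         visited[u] = true_key
--
--         for v in G[u]:
--             if visited[v] != true_key:
--                 dfs(v, true_key)
--         if true_key:
--             topological_sort.append(u)
--
--     for u in range(n):
--         if not visited[u]:
--             dfs(u)
--
--     kandydat = topological_sort[-1]
--
--     dfs(kandydat, False)
--
--     return True not in visited
-- ===== SOURCE B (Python) =====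
-- def good_start(G: list[list[int]]):
--     n = len(G)
--     visited = [False] * n
--     roots = []
--     # Phase 1: iterative explicit-stack DFS over all vertices, recording launch roots.
--     for u in range(n):
--         if not visited[u]:
--             roots.append(u)
--             stack = [u]
--             while stack:
--                 x = stack.pop()
--                 if not visited[x]:
--                     visited[x] = True
--                     stack.extend(reversed(G[x]))
--     candidate = roots[-1]
--     # Phase 2: fresh array, iterative DFS from the candidate, check it reaches everything.
--     seen = [False] * n
--     stack = [candidate]
--     while stack:
--         x = stack.pop()
--         if not seen[x]:
--             seen[x] = True
--             stack.extend(reversed(G[x]))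
--     return all(seen)
-- ===== Notes on version B (the rewrite author's own statement) =====
-- stated objective: alternative
-- what changed: Replaces the nested recursive key-flipping DFS (building a full post-order list and reusing/flipping the visited array for the second pass) by two iterative explicit-stack DFS passes: phase 1 records only the launch roots and takes roots[-1] as candidate, phase 2 runs from the candidate over a fresh boolean array and returns all(seen).
import Mathlib
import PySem

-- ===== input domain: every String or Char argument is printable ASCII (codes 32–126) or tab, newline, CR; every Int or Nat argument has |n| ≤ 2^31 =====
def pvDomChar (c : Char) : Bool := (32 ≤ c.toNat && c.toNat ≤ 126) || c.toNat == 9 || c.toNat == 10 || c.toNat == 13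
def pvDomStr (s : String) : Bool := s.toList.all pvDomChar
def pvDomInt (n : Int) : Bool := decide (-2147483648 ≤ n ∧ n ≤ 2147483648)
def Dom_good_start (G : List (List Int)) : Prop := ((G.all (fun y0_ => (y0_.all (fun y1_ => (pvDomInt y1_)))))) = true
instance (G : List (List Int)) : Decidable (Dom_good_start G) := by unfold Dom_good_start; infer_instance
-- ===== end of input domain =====

-- B replaces A's recursive key-flipping DFS (post-order list + reused/flipped visited array)
-- by two iterative explicit-stack DFS passes: phase 1 records launch roots and takes roots[-1]
-- as candidate, phase 2 marks a fresh array from the candidate and returns all(seen).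

-- Python list index (exact for -len ≤ v < len, the range Pre_ admits)
def pvIx (n : Nat) (v : Int) : Nat := (if v < 0 then v + n else v).toNat

-- ===== PORT A =====
mutual
-- the nested recursive `dfs(u, true_key)`; fuel G.length+1 bounds the recursion depth
-- (each nested call is on a vertex not yet marked with `key`, which it marks at once)
def dfsA (G : List (List Int)) (key : Bool) : Nat → Int → List Bool × List Int → List Bool × List Int
  | 0, _, st => st
  | fuel+1, u, st =>
    let i := pvIx G.length u
    let st1 := dfsAList G key fuel (G.getD i []) (st.1.set i key, st.2)
    if key then (st1.1, st1.2 ++ [u]) else st1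
  termination_by f _ _ => (f, 0)
-- the `for v in G[u]` loop of dfs
def dfsAList (G : List (List Int)) (key : Bool) : Nat → List Int → List Bool × List Int → List Bool × List Int
  | _, [], st => st
  | fuel, v :: l, st =>
    dfsAList G key fuel l (if st.1.getD (pvIx G.length v) false ≠ key then dfsA G key fuel v st else st)
  termination_by f l _ => (f, l.length + 1)
end

-- one step of A's `for u in range(n): if not visited[u]: dfs(u)`
def aStep (G : List (List Int)) (st : List Bool × List Int) (u : Nat) : List Bool × List Int :=
  if st.1.getD u false = false then dfsA G true (G.length + 1) (u : Int) st else st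

def good_start (G : List (List Int)) : Bool :=
  let n := G.length
  let st := (List.range n).foldl (aStep G) (List.replicate n false, ([] : List Int))
  let kandydat := (PySem.List.pyGet? st.2 (-1)).getD 0   -- topological_sort[-1]; none (IndexError) only outside Pre_
  !((dfsA G false (n + 1) kandydat st).1.contains true)  -- True not in visited

-- ===== PORT B =====
-- Source B's `while stack:` loop; the Lean list holds the stack top first, so
-- `stack.extend(reversed(G[x]))` followed by pops from the end is `G[x] ++ s`.
-- Fuel (n+1)*(E+1) bounds the number of iterations (pops ≤ 1 + Σ pushed rows).
def stackB (G : List (List Int)) : Nat → List Int → List Bool → List Bool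
  | 0, _, vis => vis
  | _+1, [], vis => vis
  | fuel+1, x :: s, vis =>
    let i := pvIx G.length x
    if vis.getD i false then stackB G fuel s vis
    else stackB G fuel (G.getD i [] ++ s) (vis.set i true)

def bFuel (G : List (List Int)) : Nat := (G.length + 1) * ((G.map List.length).sum + 1)

-- one step of Source B's phase-1 loop (state = (visited, roots))
def bStep (G : List (List Int)) (st : List Bool × List Int) (u : Nat) : List Bool × List Int :=
  if st.1.getD u false then st
  else (stackB G (bFuel G) [(u : Int)] st.1, st.2 ++ [(u : Int)])

def good_start_alt (G : List (List Int)) : Bool :=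
  let n := G.length
  let st := (List.range n).foldl (bStep G) (List.replicate n false, ([] : List Int))
  let candidate := (PySem.List.pyGet? st.2 (-1)).getD 0   -- roots[-1]; none (IndexError) only outside Pre_
  (stackB G (bFuel G) [candidate] (List.replicate n false)).all id  -- all(seen)

-- ===== PRECONDITION & SPEC =====
-- Pre_ = exactly the inputs where Python A returns: a nonempty graph (else topological_sort[-1]
-- raises IndexError) whose edges are in-range Python indices (else visited[v] raises IndexError).
def Pre_good_start (G : List (List Int)) : Prop :=
  G ≠ [] ∧ ∀ row ∈ G, ∀ v ∈ row, -(G.length : Int) ≤ v ∧ v < (G.length : Int)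
instance (G : List (List Int)) : Decidable (Pre_good_start G) := by unfold Pre_good_start; infer_instance

def pvWitness_good_start : List (List Int) := [[1], [0, 1]]

def Spec_good_start (G : List (List Int)) (out : Bool) : Prop := out = good_start_alt G
instance (G : List (List Int)) (out : Bool) : Decidable (Spec_good_start G out) := by unfold Spec_good_start; infer_instance

-- ===== CLAIM (what is proved, stated in full; the proofs are below) =====
def Claim_equal_good_start : Prop := ∀ (G : List (List Int)), Dom_good_start G → Pre_good_start G → Spec_good_start G (good_start G)

-- ===== LEMMAS AND PROOFS =====

-- proof-only canonical recursive marker (marks `true`, carries no post-order list)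
mutual
def recM (G : List (List Int)) : Nat → Int → List Bool → List Bool
  | 0, _, vis => vis
  | fuel+1, u, vis =>
    recMList G fuel (G.getD (pvIx G.length u) []) (vis.set (pvIx G.length u) true)
  termination_by f _ _ => (f, 0)
def recMList (G : List (List Int)) : Nat → List Int → List Bool → List Bool
  | _, [], vis => vis
  | fuel, v :: l, vis =>
    recMList G fuel l (if vis.getD (pvIx G.length v) false then vis else recM G fuel v vis)
  termination_by f l _ => (f, l.length + 1)
end

-- basic list-of-bool helpers ------------------------------------------------

theorem getD_set_self (vis : List Bool) (i : Nat) (b : Bool) (h : i < vis.length) :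
    (vis.set i b).getD i false = b := by
  induction vis generalizing i with
  | nil => simp at h
  | cons a t ih => cases i with
    | zero => simp [List.set, List.getD]
    | succ j => simpa [List.set, List.getD] using ih j (by simpa using h)

theorem getD_set_true_of_true (vis : List Bool) (i j : Nat)
    (h : vis.getD j false = true) : (vis.set i true).getD j false = true := by
  induction vis generalizing i j with
  | nil => simp at h
  | cons a t ih =>
    cases i with
    | zero => cases j with
      | zero => simp
      | succ k => simpa [List.getD] using h
    | succ i' => cases j with
      | zero => simpa [List.getD] using h
      | succ k => simpa [List.getD] using ih i' k (by simpa [List.getD] using h)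

theorem cnt_set_true_le (vis : List Bool) (i : Nat) :
    (vis.set i true).count false ≤ vis.count false := by
  induction vis generalizing i with
  | nil => simp
  | cons a t ih =>
    cases i with
    | zero => cases a <;> simp
    | succ j => cases a <;> simpa using ih j

theorem cnt_set_true_lt (vis : List Bool) (i : Nat) (hi : i < vis.length)
    (h : vis.getD i false = false) :
    (vis.set i true).count false + 1 = vis.count false := by
  induction vis generalizing i with
  | nil => simp at hi
  | cons a t ih =>
    cases i with
    | zero =>
      have : a = false := by simpa [List.getD] using h
      subst this; simp
    | succ j =>
      have := ih j (by simpa using hi) (by simp [List.getD] at h; exact h)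
      cases a <;> simp <;> omega

theorem getD_replicate_false (n i : Nat) :
    (List.replicate n false).getD i false = false := by
  induction n generalizing i with
  | zero => simp
  | succ m ih => cases i <;> simp [List.replicate, List.getD]

theorem all_true_eq_replicate (vis : List Bool) (n : Nat) (hl : vis.length = n)
    (h : ∀ j, j < n → vis.getD j false = true) : vis = List.replicate n true := by
  induction vis generalizing n with
  | nil => simp at hl; simp [← hl]
  | cons a t ih =>
    cases n with
    | zero => simp at hl
    | succ m =>
      have ha : a = true := by simpa [List.getD] using h 0 (Nat.succ_pos m)
      have ht : t = List.replicate m true := by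
        refine ih m (by simpa using hl) (fun j hj => ?_)
        simpa [List.getD] using h (j+1) (by omega)
      simp [ha, ht, List.replicate]

theorem set_oob (vis : List Bool) (i : Nat) (b : Bool) (h : vis.length ≤ i) :
    vis.set i b = vis := List.set_eq_of_length_le h

-- recM structural lemmas ----------------------------------------------------

theorem recM_length (G : List (List Int)) :
    ∀ f, (∀ u vis, (recM G f u vis).length = vis.length) ∧
         (∀ l vis, (recMList G f l vis).length = vis.length) := by
  intro f
  induction f with
  | zero =>
    constructor
    · intro u vis; simp [recM]
    · intro l vis
      induction l generalizing vis with
      | nil => simp [recMList]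
      | cons v l ih => simp [recMList]; rw [ih]; split <;> simp [recM]
  | succ f ih =>
    have hvert : ∀ u vis, (recM G (f+1) u vis).length = vis.length := by
      intro u vis; simp only [recM]; rw [ih.2]; simp
    have hlist : ∀ l vis, (recMList G (f+1) l vis).length = vis.length := by
      intro l
      induction l with
      | nil => intro vis; simp [recMList]
      | cons v l ihl =>
        intro vis
        simp only [recMList]; rw [ihl]
        split
        · rfl
        · rw [hvert]
    exact ⟨hvert, hlist⟩

theorem recM_mono_true (G : List (List Int)) :
    ∀ f, (∀ u vis j, vis.getD j false = true → (recM G f u vis).getD j false = true) ∧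
         (∀ l vis j, vis.getD j false = true → (recMList G f l vis).getD j false = true) := by
  intro f
  induction f with
  | zero =>
    constructor
    · intro u vis j h; simpa [recM] using h
    · intro l
      induction l with
      | nil => intro vis j h; simpa [recMList] using h
      | cons v l ih =>
        intro vis j h
        simp only [recMList]
        apply ih; split
        · exact h
        · simpa [recM] using h
  | succ f ih =>
    have hvert : ∀ u vis j, vis.getD j false = true → (recM G (f+1) u vis).getD j false = true := by
      intro u vis j h
      simp only [recM]; exact ih.2 _ _ _ (getD_set_true_of_true _ _ _ h)
    have hlist : ∀ l vis j, vis.getD j false = true → (recMList G (f+1) l vis).getD j false = true := by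
      intro l
      induction l with
      | nil => intro vis j h; simpa [recMList] using h
      | cons v l ihl =>
        intro vis j h
        simp only [recMList]
        apply ihl; split
        · exact h
        · exact hvert _ _ _ h
    exact ⟨hvert, hlist⟩

theorem recM_cnt_le (G : List (List Int)) :
    ∀ f, (∀ u vis, (recM G f u vis).count false ≤ vis.count false) ∧
         (∀ l vis, (recMList G f l vis).count false ≤ vis.count false) := by
  intro f
  induction f with
  | zero =>
    constructor
    · intro u vis; simp [recM]
    · intro l
      induction l with
      | nil => intro vis; simp [recMList]
      | cons v l ih =>
        intro vis
        simp only [recMList]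
        refine le_trans (ih _) ?_
        split
        · exact le_refl _
        · simp [recM]
  | succ f ih =>
    have hvert : ∀ u vis, (recM G (f+1) u vis).count false ≤ vis.count false := by
      intro u vis
      simp only [recM]
      exact le_trans (ih.2 _ _) (cnt_set_true_le _ _)
    have hlist : ∀ l vis, (recMList G (f+1) l vis).count false ≤ vis.count false := by
      intro l
      induction l with
      | nil => intro vis; simp [recMList]
      | cons v l ihl =>
        intro vis
        simp only [recMList]
        refine le_trans (ihl _) ?_
        split
        · exact le_refl _
        · exact hvert _ _
    exact ⟨hvert, hlist⟩

theorem recM_junk (G : List (List Int)) (f : Nat) (v : Int) (vis : List Bool)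
    (hl : vis.length = G.length) (h : G.length ≤ pvIx G.length v) :
    recM G f v vis = vis := by
  cases f with
  | zero => simp [recM]
  | succ f =>
    have hrow : G.getD (pvIx G.length v) [] = [] := List.getD_eq_default _ _ h
    simp only [recM]
    rw [hrow, set_oob vis _ true (by omega)]
    simp [recMList]

theorem recM_marks (G : List (List Int)) (f : Nat) (v : Int) (vis : List Bool)
    (h : pvIx G.length v < vis.length) :
    (recM G (f+1) v vis).getD (pvIx G.length v) false = true := by
  simp only [recM]
  exact (recM_mono_true G f).2 _ _ _ (getD_set_self _ _ _ h)

-- rows are bounded by the total edge count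
theorem row_le_E (G : List (List Int)) (i : Nat) :
    (G.getD i []).length ≤ (G.map List.length).sum := by
  by_cases h : i < G.length
  · rw [List.getD_eq_getElem _ _ h]
    exact List.le_sum_of_mem (List.mem_map_of_mem (List.getElem_mem h))
  · rw [List.getD_eq_default _ _ (by omega)]; simp

-- stack saturation: any two sufficient fuels give the same result ------------

theorem stackB_nil (G : List (List Int)) (f : Nat) (vis : List Bool) :
    stackB G f [] vis = vis := by cases f <;> simp [stackB]

theorem stackB_sat (G : List (List Int)) :
    ∀ F F' s vis, vis.length = G.length →
      s.length + vis.count false * ((G.map List.length).sum + 1) ≤ F →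
      s.length + vis.count false * ((G.map List.length).sum + 1) ≤ F' →
      stackB G F s vis = stackB G F' s vis := by
  intro F
  induction F using Nat.strong_induction_on with
  | _ F ih =>
    intro F' s vis hl hF hF'
    cases s with
    | nil => rw [stackB_nil, stackB_nil]
    | cons x s =>
      simp only [List.length_cons] at hF hF'
      obtain ⟨F0, rfl⟩ : ∃ F0, F = F0 + 1 := ⟨F - 1, by omega⟩
      obtain ⟨F0', rfl⟩ : ∃ F0', F' = F0' + 1 := ⟨F' - 1, by omega⟩
      simp only [stackB]
      split
      · exact ih F0 (by omega) F0' s vis hl (by omega) (by omega)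
      · rename_i hguard
        by_cases hi : pvIx G.length x < G.length
        · have hcnt : (vis.set (pvIx G.length x) true).count false + 1 = vis.count false :=
            cnt_set_true_lt vis _ (by omega) (by simpa using hguard)
          have hrow := row_le_E G (pvIx G.length x)
          have hexp : vis.count false * ((G.map List.length).sum + 1)
              = (vis.set (pvIx G.length x) true).count false * ((G.map List.length).sum + 1)
                + ((G.map List.length).sum + 1) := by
            rw [← hcnt]; ring
          refine ih F0 (by omega) F0' _ _ (by simpa using hl) ?_ ?_ <;>
            (simp only [List.length_append]; omega)
        · have hrow : G.getD (pvIx G.length x) [] = [] := List.getD_eq_default _ _ (by omega)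
          have hset : vis.set (pvIx G.length x) true = vis :=
            set_oob _ _ _ (by omega)
          rw [hrow, hset]
          simp only [List.nil_append]
          exact ih F0 (by omega) F0' _ _ hl (by omega) (by omega)

-- the cross lemma: the explicit stack simulates the recursive marker ---------

theorem cnt_false_pos (vis : List Bool) (i : Nat) (hi : i < vis.length)
    (h : vis.getD i false = false) : 0 < vis.count false := by
  have hv : vis[i] = false := by
    rw [List.getD_eq_getElem _ _ hi] at h; exact h
  exact List.count_pos_iff.mpr (by rw [← hv]; exact List.getElem_mem hi)

theorem cross (G : List (List Int)) :
    ∀ c l F F' s vis Fr, vis.count false ≤ c → vis.length = G.length →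
      vis.count false ≤ Fr →
      (l ++ s).length + vis.count false * ((G.map List.length).sum + 1) ≤ F →
      s.length + vis.count false * ((G.map List.length).sum + 1) ≤ F' →
      stackB G F (l ++ s) vis = stackB G F' s (recMList G Fr l vis) := by
  intro c
  induction c using Nat.strong_induction_on with
  | _ c ihc =>
    intro l
    induction l with
    | nil =>
      intro F F' s vis Fr _ hl _ hF hF'
      have : recMList G Fr [] vis = vis := by cases Fr <;> simp [recMList]
      rw [this]
      simp only [List.nil_append] at hF
      exact stackB_sat G F F' s vis hl hF hF'
    | cons v l ihl =>
      intro F F' s vis Fr hc hl hFr hF hF'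
      simp only [List.cons_append, List.length_cons, List.length_append] at hF hF' ⊢
      obtain ⟨F0, rfl⟩ : ∃ F0, F = F0 + 1 := ⟨F - 1, by omega⟩
      simp only [stackB]
      by_cases hg : vis.getD (pvIx G.length v) false = true
      · rw [if_pos hg]
        have hrl : recMList G Fr (v :: l) vis = recMList G Fr l vis := by
          cases Fr <;> · simp only [recMList, hg]; simp
        rw [hrl]
        exact ihl F0 F' s vis Fr hc hl hFr (by simp only [List.length_append]; omega) hF'
      · rw [if_neg hg]
        have hgf : vis.getD (pvIx G.length v) false = false := by
          cases hx : vis.getD (pvIx G.length v) false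
          · rfl
          · exact absurd hx hg
        by_cases hi : pvIx G.length v < G.length
        · -- in-range pop: mark v, push its row
          have hpos : 0 < vis.count false := cnt_false_pos vis _ (by omega) hgf
          obtain ⟨Fr0, rfl⟩ : ∃ Fr0, Fr = Fr0 + 1 := ⟨Fr - 1, by omega⟩
          have hrm : recM G (Fr0+1) v vis
              = recMList G Fr0 (G.getD (pvIx G.length v) []) (vis.set (pvIx G.length v) true) := by
            simp [recM]
          have hcnt : (vis.set (pvIx G.length v) true).count false + 1 = vis.count false :=
            cnt_set_true_lt vis _ (by omega) hgf
          have hrow := row_le_E G (pvIx G.length v)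
          have hexp : vis.count false * ((G.map List.length).sum + 1)
              = (vis.set (pvIx G.length v) true).count false * ((G.map List.length).sum + 1)
                + ((G.map List.length).sum + 1) := by
            rw [← hcnt]; ring
          have hrl : recMList G (Fr0+1) (v :: l) vis
              = recMList G (Fr0+1) l (recM G (Fr0+1) v vis) := by
            simp only [recMList, hgf]; simp
          set X := l.length + s.length
              + (vis.set (pvIx G.length v) true).count false * ((G.map List.length).sum + 1) with hX
          have step1 := ihc (c - 1) (by omega) (G.getD (pvIx G.length v) []) F0 X (l ++ s)
            (vis.set (pvIx G.length v) true) Fr0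
            (by omega) (by simpa using hl) (by omega)
            (by simp only [List.length_append]; omega)
            (by simp only [List.length_append]; omega)
          have hw0 : (recMList G Fr0 (G.getD (pvIx G.length v) [])
              (vis.set (pvIx G.length v) true)).count false
              ≤ (vis.set (pvIx G.length v) true).count false :=
            (recM_cnt_le G Fr0).2 _ _
          have hw2 : (recMList G Fr0 (G.getD (pvIx G.length v) [])
              (vis.set (pvIx G.length v) true)).length = G.length := by
            rw [(recM_length G Fr0).2]; simpa using hl
          have hmul := Nat.mul_le_mul_right ((G.map List.length).sum + 1) hw0
          have step2 := ihl X F' s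
            (recMList G Fr0 (G.getD (pvIx G.length v) []) (vis.set (pvIx G.length v) true)) (Fr0+1)
            (by omega) hw2 (by omega)
            (by simp only [List.length_append]; omega)
            (by omega)
          rw [hrl, hrm]
          exact step1.trans step2
        · -- out-of-range pop: no mark, empty row
          have hrow : G.getD (pvIx G.length v) [] = [] := List.getD_eq_default _ _ (by omega)
          have hset : vis.set (pvIx G.length v) true = vis := set_oob _ _ _ (by omega)
          have hw : recM G Fr v vis = vis := recM_junk G Fr v vis hl (by omega)
          have hrl : recMList G Fr (v :: l) vis = recMList G Fr l vis := by
            cases Fr with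
            | zero => simp only [recMList, hgf]; simp [recM]
            | succ Fr0 => simp only [recMList, hgf]; simp [hw]
          rw [hrow, hset, hrl, List.nil_append]
          exact ihl F0 F' s vis Fr hc hl hFr (by simp only [List.length_append]; omega) hF'

-- dfsA ↔ recM ---------------------------------------------------------------

theorem getD_oob (vis : List Bool) (i : Nat) (h : vis.length ≤ i) :
    vis.getD i false = false := List.getD_eq_default _ _ h

theorem getD_map_not_lt (vis : List Bool) (i : Nat) (hi : i < vis.length) :
    (vis.map (fun b => !b)).getD i false = !(vis.getD i false) := by
  rw [List.getD_eq_getElem _ _ (by simpa using hi), List.getD_eq_getElem _ _ hi]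
  simp

theorem map_not_not (vis : List Bool) :
    (vis.map (fun b => !b)).map (fun b => !b) = vis := by
  simp [List.map_map, Function.comp_def]

theorem dfsA_true_fst (G : List (List Int)) :
    ∀ f, (∀ u st, (dfsA G true f u st).1 = recM G f u st.1) ∧
         (∀ l st, (dfsAList G true f l st).1 = recMList G f l st.1) := by
  intro f
  induction f with
  | zero =>
    constructor
    · intro u st; simp [dfsA, recM]
    · intro l
      induction l with
      | nil => intro st; simp [dfsAList, recMList]
      | cons v l ih =>
        intro st
        simp only [dfsAList, recMList]
        rw [ih]
        cases hx : st.1.getD (pvIx G.length v) false <;>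
          simp [dfsA, recM]
  | succ f ih =>
    have hvert : ∀ u st, (dfsA G true (f+1) u st).1 = recM G (f+1) u st.1 := by
      intro u st
      simp only [dfsA, recM]
      split <;> exact ih.2 _ _
    have hlist : ∀ l st, (dfsAList G true (f+1) l st).1 = recMList G (f+1) l st.1 := by
      intro l
      induction l with
      | nil => intro st; simp [dfsAList, recMList]
      | cons v l ihl =>
        intro st
        simp only [dfsAList, recMList]
        rw [ihl]
        cases hx : st.1.getD (pvIx G.length v) false
        · rw [if_pos (show (false:Bool) ≠ true by decide),
              if_neg (show ¬((false:Bool) = true) by decide)]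
          congr 1
          exact hvert v st
        · rw [if_neg (show ¬((true:Bool) ≠ true) by decide),
              if_pos (show (true:Bool) = true from rfl)]
    exact ⟨hvert, hlist⟩

theorem dfsA_false_fst (G : List (List Int)) :
    ∀ f, (∀ (u : Int) (st : List Bool × List Int), st.1.length = G.length →
            (dfsA G false f u st).1 = (recM G f u (st.1.map (fun b => !b))).map (fun b => !b)) ∧
         (∀ (l : List Int) (st : List Bool × List Int), st.1.length = G.length →
            (dfsAList G false f l st).1 = (recMList G f l (st.1.map (fun b => !b))).map (fun b => !b)) := by
  intro f
  induction f with
  | zero =>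
    constructor
    · intro u st _
      simp [dfsA, recM, List.map_map, Function.comp_def, Bool.not_not]
    · intro l
      induction l with
      | nil =>
        intro st _
        simp [dfsAList, recMList, List.map_map, Function.comp_def, Bool.not_not]
      | cons v l ihl =>
        intro st hl
        simp only [dfsAList, recMList, dfsA, recM, ite_self]
        exact ihl st hl
  | succ f ih =>
    have hvert : ∀ (u : Int) (st : List Bool × List Int), st.1.length = G.length →
        (dfsA G false (f+1) u st).1 = (recM G (f+1) u (st.1.map (fun b => !b))).map (fun b => !b) := by
      intro u st hl
      simp only [dfsA, recM]
      rw [if_neg (by simp)]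
      have := ih.2 (G.getD (pvIx G.length u) [])
        (st.1.set (pvIx G.length u) false, st.2) (by simpa using hl)
      simp only at this
      rw [this, List.map_set]
      simp
    have hlist : ∀ (l : List Int) (st : List Bool × List Int), st.1.length = G.length →
        (dfsAList G false (f+1) l st).1 = (recMList G (f+1) l (st.1.map (fun b => !b))).map (fun b => !b) := by
      intro l
      induction l with
      | nil =>
        intro st _
        simp only [dfsAList, recMList, List.map_map]
        simp [Function.comp_def]
      | cons v l ihl =>
        intro st hl
        simp only [dfsAList, recMList]
        by_cases hi : pvIx G.length v < st.1.length
        · rw [getD_map_not_lt _ _ hi]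
          cases hx : st.1.getD (pvIx G.length v) false
          · -- both sides skip
            rw [if_neg (show ¬((false:Bool) ≠ false) by decide),
                if_pos (show (!(false:Bool)) = true by decide)]
            exact ihl st hl
          · -- both sides visit v
            rw [if_pos (show (true:Bool) ≠ false by decide),
                if_neg (show ¬((!(true:Bool)) = true) by decide)]
            have hst' := hvert v st hl
            have hlen' : (dfsA G false (f+1) v st).1.length = G.length := by
              rw [hst', List.length_map, (recM_length G (f+1)).1, List.length_map, hl]
            rw [ihl (dfsA G false (f+1) v st) hlen']
            congr 2
            rw [hst', map_not_not]
        · -- junk index: A skips, recM visits as a no-op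
          have hgd : st.1.getD (pvIx G.length v) false = false := getD_oob _ _ (by omega)
          have hgd2 : (st.1.map (fun b => !b)).getD (pvIx G.length v) false = false :=
            getD_oob _ _ (by rw [List.length_map]; omega)
          have hnone : st.1[pvIx G.length v]? = none := by
            rw [List.getElem?_eq_none_iff]; omega
          rw [if_neg (show ¬(st.1.getD (pvIx G.length v) false ≠ false) by simp [hnone]),
              if_neg (show ¬((st.1.map (fun b => !b)).getD (pvIx G.length v) false = true) by simp [hnone])]
          rw [recM_junk G (f+1) v _ (by rw [List.length_map]; exact hl) (by omega)]
          exact ihl st hl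
    exact ⟨hvert, hlist⟩

theorem dfsA_true_snd_last (G : List (List Int)) (f : Nat) (u : Int) (st : List Bool × List Int) :
    (dfsA G true (f+1) u st).2.getLast? = some u := by
  simp [dfsA]

-- phase-1 correlation --------------------------------------------------------

theorem pvIx_natCast (n u : Nat) : pvIx n (u : Int) = u := by
  simp only [pvIx]; omega

theorem phase1_corr (G : List (List Int)) :
    ∀ (L : List Nat) (stA stB : List Bool × List Int),
      stA.1 = stB.1 → stA.1.length = G.length → stA.2.getLast? = stB.2.getLast? →
      (L.foldl (aStep G) stA).1 = (L.foldl (bStep G) stB).1 ∧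
      (L.foldl (aStep G) stA).1.length = G.length ∧
      (L.foldl (aStep G) stA).2.getLast? = (L.foldl (bStep G) stB).2.getLast? := by
  intro L
  induction L with
  | nil => intro stA stB h1 h2 h3; exact ⟨h1, h2, h3⟩
  | cons u L ih =>
    intro stA stB h1 h2 h3
    simp only [List.foldl_cons]
    cases hg : stA.1.getD u false
    · -- unvisited: A launches dfs, B launches the stack DFS and records the root
      have hgB : stB.1.getD u false = false := by rw [← h1]; exact hg
      have hA : aStep G stA u = dfsA G true (G.length + 1) (u : Int) stA := by
        simp only [aStep]; rw [if_pos hg]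
      have hB : bStep G stB u
          = (stackB G (bFuel G) [(u : Int)] stB.1, stB.2 ++ [(u : Int)]) := by
        simp only [bStep]
        rw [if_neg (by rw [hgB]; simp)]
      have hcntlen : stB.1.count false ≤ G.length := by
        rw [← h1, ← h2]; exact List.count_le_length
      have hmul := Nat.mul_le_mul_right ((G.map List.length).sum + 1) hcntlen
      have hexp : (G.length + 1) * ((G.map List.length).sum + 1)
          = G.length * ((G.map List.length).sum + 1) + ((G.map List.length).sum + 1) := by ring
      have hstack : stackB G (bFuel G) [(u : Int)] stB.1
          = recMList G (G.length + 1) [(u : Int)] stB.1 := by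
        have := cross G (stB.1.count false) [(u : Int)] (bFuel G)
          (stB.1.count false * ((G.map List.length).sum + 1)) [] stB.1 (G.length + 1)
          le_rfl (by rw [← h1]; exact h2) (by omega)
          (by simp only [List.append_nil, List.length_cons, List.length_nil, bFuel]; omega)
          (by simp)
        simpa using this.trans (stackB_nil G _ _)
      have hrecu : recMList G (G.length + 1) [(u : Int)] stB.1
          = recM G (G.length + 1) (u : Int) stB.1 := by
        simp only [recMList, pvIx_natCast]
        rw [if_neg (by rw [hgB]; simp)]
      have hfst : (dfsA G true (G.length + 1) (u : Int) stA).1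
          = (stackB G (bFuel G) [(u : Int)] stB.1) := by
        rw [hstack, hrecu, (dfsA_true_fst G (G.length + 1)).1, h1]
      have hlen' : (dfsA G true (G.length + 1) (u : Int) stA).1.length = G.length := by
        rw [(dfsA_true_fst G (G.length + 1)).1, (recM_length G _).1, h2]
      refine ih _ _ ?_ ?_ ?_
      · rw [hA, hB]; exact hfst
      · rw [hA]; exact hlen'
      · rw [hA, hB, dfsA_true_snd_last]
        simp
    · -- already visited: both skip
      have hgB : stB.1.getD u false = true := by rw [← h1]; exact hg
      have hA : aStep G stA u = stA := by
        simp only [aStep]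
        rw [if_neg (by rw [hg]; simp)]
      have hB : bStep G stB u = stB := by
        simp only [bStep]
        rw [if_pos hgB]
      rw [hA, hB]
      exact ih _ _ h1 h2 h3

theorem phase1_pres_true (G : List (List Int)) :
    ∀ (L : List Nat) (st : List Bool × List Int) (j : Nat),
      st.1.getD j false = true → ((L.foldl (aStep G) st).1).getD j false = true := by
  intro L
  induction L with
  | nil => intro st j h; exact h
  | cons u L ih =>
    intro st j h
    simp only [List.foldl_cons]
    refine ih _ _ ?_
    simp only [aStep]
    split
    · rw [(dfsA_true_fst G (G.length + 1)).1]
      exact (recM_mono_true G _).1 _ _ _ h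
    · exact h

theorem phase1_all_true (G : List (List Int)) :
    ∀ (L : List Nat) (st : List Bool × List Int),
      ∀ u ∈ L, u < st.1.length → ((L.foldl (aStep G) st).1).getD u false = true := by
  intro L
  induction L with
  | nil => intro st u hu; simp at hu
  | cons v L ih =>
    intro st u hu hlt
    simp only [List.foldl_cons]
    rcases List.mem_cons.mp hu with rfl | hu'
    · -- u is processed by this step; afterwards it stays true
      refine phase1_pres_true G L _ u ?_
      simp only [aStep]
      cases hg : st.1.getD u false
      · rw [if_pos rfl, (dfsA_true_fst G (G.length + 1)).1]
        have := recM_marks G G.length (u : Int) st.1 (by rw [pvIx_natCast]; exact hlt)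
        rwa [pvIx_natCast] at this
      · rw [if_neg (show ¬((true:Bool) = false) by decide)]
        exact hg
    · refine ih _ u hu' ?_
      simp only [aStep]
      split
      · rw [(dfsA_true_fst G (G.length + 1)).1, (recM_length G _).1]; exact hlt
      · exact hlt

-- final-value bridge ---------------------------------------------------------

theorem contains_map_not (M : List Bool) :
    (!((M.map (fun b => !b)).contains true)) = M.all id := by
  induction M with
  | nil => simp
  | cons a t ih => cases a <;> simp_all

-- ===== VERDICT (by name: the statement is the Claim_ definition above) =====
theorem good_start_spec : Claim_equal_good_start := by
  intro G _ _
  unfold Spec_good_start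
  obtain ⟨hvis, hlen, hlast⟩ := phase1_corr G (List.range G.length)
    (List.replicate G.length false, ([] : List Int))
    (List.replicate G.length false, ([] : List Int)) rfl (by simp) rfl
  set stA := (List.range G.length).foldl (aStep G)
    (List.replicate G.length false, ([] : List Int)) with hstA
  set stB := (List.range G.length).foldl (bStep G)
    (List.replicate G.length false, ([] : List Int)) with hstB
  have hk : (PySem.List.pyGet? stA.2 (-1)).getD 0 = (PySem.List.pyGet? stB.2 (-1)).getD 0 := by
    rw [PySem.List.pyGet?_neg_one, PySem.List.pyGet?_neg_one, hlast]
  set k := (PySem.List.pyGet? stB.2 (-1)).getD 0 with hkdef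
  have hAT : stA.1 = List.replicate G.length true := by
    refine all_true_eq_replicate _ _ hlen (fun j hj => ?_)
    exact phase1_all_true G (List.range G.length) _ j (List.mem_range.mpr hj) (by simpa using hj)
  have h2A : (dfsA G false (G.length + 1) k stA).1
      = (recM G (G.length + 1) k (List.replicate G.length false)).map (fun b => !b) := by
    rw [(dfsA_false_fst G (G.length + 1)).1 k stA hlen, hAT]
    simp
  have hexp : (G.length + 1) * ((G.map List.length).sum + 1)
      = G.length * ((G.map List.length).sum + 1) + ((G.map List.length).sum + 1) := by ring
  have h2B : stackB G (bFuel G) [k] (List.replicate G.length false)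
      = recM G (G.length + 1) k (List.replicate G.length false) := by
    have hc := cross G G.length [k] (bFuel G)
      (G.length * ((G.map List.length).sum + 1)) [] (List.replicate G.length false)
      (G.length + 1) (by simp) (by simp) (by simp)
      (by simp only [List.append_nil, List.length_cons, List.length_nil, List.count_replicate,
            bFuel]
          simp only [BEq.rfl, if_pos]
          omega)
      (by simp)
    have hone : recMList G (G.length + 1) [k] (List.replicate G.length false)
        = recM G (G.length + 1) k (List.replicate G.length false) := by
      simp only [recMList]
      rw [if_neg (by rw [getD_replicate_false]; simp)]
    rw [← hone]
    simpa using hc.trans (stackB_nil G _ _)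
  show (!((dfsA G false (G.length + 1) ((PySem.List.pyGet? stA.2 (-1)).getD 0) stA).1.contains true))
      = (stackB G (bFuel G) [(PySem.List.pyGet? stB.2 (-1)).getD 0] (List.replicate G.length false)).all id
  rw [hk, h2A, h2B, contains_map_not]
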